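-- pv_equiv track=rewrite | github.com/Superluminal-Studios/sulu-blender-addon | transfers/submit/workflow_runtime_helpers.py | check_risky_path_chars
-- ===== SOURCE A (Python) =====
-- from typing import Callable, Optional
--
-- RISKY_CHARS = set("()'\"` &|;$!#")
--
-- def check_risky_path_chars(path_str: str) -> Optional[str]:
--     found = set(c for c in path_str if c in RISKY_CHARS)
--     if found:
--         chars = " ".join(repr(c) for c in sorted(found))
--         return (
--             f"Path contains special characters ({chars}) that may cause "
--             f"issues on the render farm: {path_str}"
--         )
--     return None
-- ===== SOURCE B (Python) =====
-- RISKY_CHARS = set("()'\"` &|;$!#")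
--
-- def check_risky_path_chars(path_str):
--     present = [c for c in sorted(RISKY_CHARS) if c in path_str]
--     if not present:
--         return None
--     chars = " ".join(repr(c) for c in present)
--     return (
--         f"Path contains special characters ({chars}) that may cause "
--         f"issues on the render farm: {path_str}"
--     )
-- ===== Notes on version B (the rewrite author's own statement) =====
-- stated objective: alternative
-- what changed: B iterates over the fixed sorted RISKY_CHARS alphabet probing each for membership in the path (so no per-input set is built or sorted), instead of A's scan of the path collecting a set that is then sorted.
import Mathlib
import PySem

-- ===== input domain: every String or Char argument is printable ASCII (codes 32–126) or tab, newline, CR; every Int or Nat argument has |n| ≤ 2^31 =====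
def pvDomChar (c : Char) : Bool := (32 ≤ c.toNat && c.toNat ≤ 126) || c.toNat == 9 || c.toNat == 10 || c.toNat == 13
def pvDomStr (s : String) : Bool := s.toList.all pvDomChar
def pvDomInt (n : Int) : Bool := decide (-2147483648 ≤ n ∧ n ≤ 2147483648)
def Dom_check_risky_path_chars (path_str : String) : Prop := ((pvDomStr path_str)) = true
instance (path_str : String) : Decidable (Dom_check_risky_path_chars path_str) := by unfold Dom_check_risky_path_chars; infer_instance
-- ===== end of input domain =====

-- B probes each char of the fixed sorted risky alphabet for membership in the path, instead of
-- A's scan of the path collecting a set that is then sorted; same output, alternative traversal.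


-- ===== PORT A =====
-- RISKY_CHARS = set("()'\"` &|;$!#")
def riskyChars : PySem.Set Char := PySem.Set.ofList "()'\"` &|;$!#".toList

-- repr(c): exact for the characters of RISKY_CHARS (printable, no backslash): repr is the char
-- single-quoted, except the single quote itself, which Python double-quotes.
def pyReprChar (c : Char) : String :=
  if c = '\'' then "\"'\"" else String.ofList ['\'', c, '\'']

def check_risky_path_chars (path_str : String) : Option String :=
  let found : PySem.Set Char :=
    PySem.Set.ofList (path_str.toList.filter (fun c => PySem.Set.contains riskyChars c))
  if found ≠ [] then
    let chars := PySem.Str.join " " ((PySem.List.sorted found (fun x => x) false).map pyReprChar)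
    some (PySem.Str.join "" ["Path contains special characters (", chars,
          ") that may cause issues on the render farm: ", path_str])
  else none

-- ===== PORT B =====
def check_risky_path_chars_alt (path_str : String) : Option String :=
  let present : List Char :=
    (PySem.List.sorted riskyChars (fun x => x) false).filter
      (fun c => PySem.Str.isIn (String.ofList [c]) path_str)
  if present = [] then none
  else
    let chars := PySem.Str.join " " (present.map pyReprChar)
    some (PySem.Str.join "" ["Path contains special characters (", chars,
          ") that may cause issues on the render farm: ", path_str])

-- ===== PRECONDITION & SPEC =====
def Spec_check_risky_path_chars (path_str : String) (out : Option String) : Prop := out = check_risky_path_chars_alt path_str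
instance (path_str : String) (out : Option String) : Decidable (Spec_check_risky_path_chars path_str out) := by unfold Spec_check_risky_path_chars; infer_instance

-- ===== CLAIM (what is proved, stated in full; the proofs are below) =====
def Claim_equal_check_risky_path_chars : Prop := ∀ (path_str : String), Dom_check_risky_path_chars path_str → Spec_check_risky_path_chars path_str (check_risky_path_chars path_str)

-- ===== LEMMAS AND PROOFS =====

lemma singleton_infix_iff_mem {c : Char} {l : List Char} : [c] <:+: l ↔ c ∈ l := by
  constructor
  · intro h
    exact (List.singleton_sublist).mp h.sublist
  · intro h
    obtain ⟨s, t, rfl⟩ := List.append_of_mem h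
    exact ⟨s, t, by simp⟩

-- the core: A's sorted de-duplicated scan of the path = B's filter of the sorted alphabet
lemma sorted_found_eq (l : List Char) :
    PySem.List.sorted (PySem.Set.ofList (l.filter (fun c => PySem.Set.contains riskyChars c)))
      (fun x => x) false
    = (PySem.List.sorted riskyChars (fun x => x) false).filter
        (fun c => PySem.Chars.isIn [c] l) := by
  apply PySem.List.sorted_eq_of_perm_of_pairwise_lt
  · rw [List.perm_ext_iff_of_nodup
      (List.Nodup.filter _ (by decide)) (PySem.Set.nodup_ofList _)]
    intro c
    simp only [List.mem_filter, PySem.Set.mem_ofList, PySem.Chars.isIn_iff_infix,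
      singleton_infix_iff_mem, PySem.Set.contains_iff, PySem.List.mem_sorted]
    tauto
  · exact List.Pairwise.filter _ (by decide)

lemma empty_found_iff (l : List Char) :
    (PySem.Set.ofList (l.filter (fun c => PySem.Set.contains riskyChars c)) = [])
    ↔ ((PySem.List.sorted riskyChars (fun x => x) false).filter
        (fun c => PySem.Chars.isIn [c] l) = []) := by
  rw [← sorted_found_eq]
  exact (PySem.List.sorted_eq_nil_iff _ _ _).symm

-- ===== VERDICT (by name: the statement is the Claim_ definition above) =====
theorem check_risky_path_chars_spec : Claim_equal_check_risky_path_chars := by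
  intro path_str _
  unfold Spec_check_risky_path_chars check_risky_path_chars check_risky_path_chars_alt
  simp only [PySem.Str.isIn_eq, String.toList_ofList, ite_not]
  by_cases h : PySem.Set.ofList (path_str.toList.filter
      (fun c => PySem.Set.contains riskyChars c)) = []
  · rw [if_pos h, if_pos ((empty_found_iff path_str.toList).mp h)]
  · rw [if_neg h, if_neg (fun hc => h ((empty_found_iff path_str.toList).mpr hc)),
      sorted_found_eq]
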